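-- pv_equiv track=rewrite | github.com/curiousTauseef/thesis-scripts | utils.py | extract_gnc
-- ===== SOURCE A (Python) =====
-- gender_tags = {'m1', 'm2', 'm3', 'f', 'n'}
--
-- number_tags = {'pl', 'sg'}
--
-- case_tags = {'nom', 'gen', 'dat', 'acc', 'inst', 'loc', 'voc'}
--
-- def extract_gnc(interpretation):
--     gender = next((token for token in interpretation if token in gender_tags), None)
--     number = next((token for token in interpretation if token in number_tags), None)
--     case = next((token for token in interpretation if token in case_tags), None)
--     pos = interpretation[0]
--     gnc = ''.join(list(filter(None, [gender, number, case])))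
--     if gnc:
--         return "{0}:{1}".format(pos, gnc)
--     return pos
-- ===== SOURCE B (Python) =====
-- gender_tags = {'m1', 'm2', 'm3', 'f', 'n'}
--
-- number_tags = {'pl', 'sg'}
--
-- case_tags = {'nom', 'gen', 'dat', 'acc', 'inst', 'loc', 'voc'}
--
-- def _category(token):
--     if token in gender_tags:
--         return 0
--     if token in number_tags:
--         return 1
--     if token in case_tags:
--         return 2
--     return None
--
-- def extract_gnc(interpretation):
--     pos = interpretation[0]
--     slots = [None, None, None]
--     for token in interpretation:
--         i = _category(token)
--         if i is not None and slots[i] is None: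
--             slots[i] = token
--     gnc = ''.join(t for t in slots if t)
--     return "{0}:{1}".format(pos, gnc) if gnc else pos
-- ===== Notes on version B (the rewrite author's own statement) =====
-- stated objective: alternative
-- what changed: Replaces A's three separate next() scans over interpretation with a single pass that classifies each token into a gender/number/case slot via one category helper and fills each still-empty slot on first match.
import Mathlib
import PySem

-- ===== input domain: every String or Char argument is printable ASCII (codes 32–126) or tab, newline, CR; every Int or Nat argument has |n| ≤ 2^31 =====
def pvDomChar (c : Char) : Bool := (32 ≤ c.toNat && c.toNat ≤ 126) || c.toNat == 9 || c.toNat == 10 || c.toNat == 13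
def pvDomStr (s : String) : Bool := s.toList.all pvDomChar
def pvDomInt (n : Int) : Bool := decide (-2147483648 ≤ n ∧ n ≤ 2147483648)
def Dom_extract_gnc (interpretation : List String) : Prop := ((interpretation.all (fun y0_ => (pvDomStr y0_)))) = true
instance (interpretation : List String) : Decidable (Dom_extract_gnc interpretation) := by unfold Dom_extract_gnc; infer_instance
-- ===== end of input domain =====

-- B replaces A's three separate first-match scans with one classification pass; return values proved equal on nonempty input.

def genderTags : List String := ["m1", "m2", "m3", "f", "n"]
def numberTags : List String := ["pl", "sg"]
def caseTags : List String := ["nom", "gen", "dat", "acc", "inst", "loc", "voc"]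

-- ===== PORT A =====
def extract_gnc (interpretation : List String) : String :=
  let gender := interpretation.find? (fun t => genderTags.contains t)
  let number := interpretation.find? (fun t => numberTags.contains t)
  let case_ := interpretation.find? (fun t => caseTags.contains t)
  -- interpretation[0]: Pre_ excludes the empty list, where Python raises IndexError
  let pos := (PySem.List.pyGet? interpretation 0).getD ""
  -- filter(None, …) keeps truthy (non-None, nonempty) strings
  let gnc := String.join (([gender, number, case_].filterMap id).filter (fun s => s ≠ ""))
  if gnc ≠ "" then pos ++ ":" ++ gnc else pos

-- ===== PORT B =====
def gncCategory (token : String) : Option Nat :=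
  if genderTags.contains token then some 0
  else if numberTags.contains token then some 1
  else if caseTags.contains token then some 2
  else none

def gncStep (s : Option String × Option String × Option String) (token : String) :
    Option String × Option String × Option String :=
  match gncCategory token with
  | some 0 => if s.1 = none then (some token, s.2.1, s.2.2) else s
  | some 1 => if s.2.1 = none then (s.1, some token, s.2.2) else s
  | some 2 => if s.2.2 = none then (s.1, s.2.1, some token) else s
  | _ => s

def extract_gnc_alt (interpretation : List String) : String :=
  -- interpretation[0]: Pre_ excludes the empty list, where Python raises IndexError
  let pos := (PySem.List.pyGet? interpretation 0).getD ""
  let s := interpretation.foldl gncStep (none, none, none)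
  -- ''.join(t for t in slots if t) keeps truthy (non-None, nonempty) strings
  let gnc := String.join (([s.1, s.2.1, s.2.2].filterMap id).filter (fun t => t ≠ ""))
  if gnc ≠ "" then pos ++ ":" ++ gnc else pos

-- ===== PRECONDITION & SPEC =====
-- Pre_ excludes exactly the empty list, on which Python A (and B) raise IndexError at interpretation[0].
def Pre_extract_gnc (interpretation : List String) : Prop := interpretation ≠ []
instance (interpretation : List String) : Decidable (Pre_extract_gnc interpretation) := by
  unfold Pre_extract_gnc; infer_instance

def pvWitness_extract_gnc : List String := ["subst", "sg", "f", "nom"]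

def Spec_extract_gnc (interpretation : List String) (out : String) : Prop := out = extract_gnc_alt interpretation
instance (interpretation : List String) (out : String) : Decidable (Spec_extract_gnc interpretation out) := by unfold Spec_extract_gnc; infer_instance

-- ===== CLAIM (what is proved, stated in full; the proofs are below) =====
def Claim_equal_extract_gnc : Prop := ∀ (interpretation : List String), Dom_extract_gnc interpretation → Pre_extract_gnc interpretation → Spec_extract_gnc interpretation (extract_gnc interpretation)

-- ===== LEMMAS AND PROOFS =====

-- the three tag sets are pairwise disjoint
theorem gender_not_number {t : String} (h : t ∈ genderTags) : t ∉ numberTags := by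
  simp only [genderTags, List.mem_cons, List.not_mem_nil, or_false] at h
  rcases h with rfl | rfl | rfl | rfl | rfl <;> decide

theorem gender_not_case {t : String} (h : t ∈ genderTags) : t ∉ caseTags := by
  simp only [genderTags, List.mem_cons, List.not_mem_nil, or_false] at h
  rcases h with rfl | rfl | rfl | rfl | rfl <;> decide

theorem number_not_case {t : String} (h : t ∈ numberTags) : t ∉ caseTags := by
  simp only [numberTags, List.mem_cons, List.not_mem_nil, or_false] at h
  rcases h with rfl | rfl <;> decide

-- B's single fold computes the same three first matches as A's three scans
theorem foldl_gncStep (l : List String) (g n c : Option String) :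
    l.foldl gncStep (g, n, c) =
      (g.or (l.find? fun t => genderTags.contains t),
       n.or (l.find? fun t => numberTags.contains t),
       c.or (l.find? fun t => caseTags.contains t)) := by
  induction l generalizing g n c with
  | nil => simp
  | cons t l ih =>
    simp only [List.foldl_cons, List.find?_cons]
    by_cases hg : t ∈ genderTags
    · have hn := gender_not_number hg
      have hc := gender_not_case hg
      cases g <;> simp [gncStep, gncCategory, hg, hn, hc, ih, Option.or]
    · by_cases hn : t ∈ numberTags
      · have hc := number_not_case hn
        cases n <;> simp [gncStep, gncCategory, hg, hn, hc, ih, Option.or]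
      · by_cases hc : t ∈ caseTags
        · cases c <;> simp [gncStep, gncCategory, hg, hn, hc, ih, Option.or]
        · simp [gncStep, gncCategory, hg, hn, hc, ih]

-- ===== VERDICT (by name: the statement is the Claim_ definition above) =====
theorem extract_gnc_spec : Claim_equal_extract_gnc := by
  intro interpretation _ _
  unfold Spec_extract_gnc extract_gnc extract_gnc_alt
  simp [foldl_gncStep, Option.or]
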